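-- pv_equiv track=rewrite | github.com/dj-lumiere/problem-solving-boj | 백준/Silver/16974. 레벨 햄버거/레벨 햄버거.py | patty_count
-- ===== SOURCE A (Python) =====
-- def patty_count(N: int) -> int:
--     if N == 0:
--         return 1
--     else:
--         memo = 1
--         for i in range(N):
--             memo = 2 * memo + 1
--         return memo
-- ===== SOURCE B (Python) =====
-- def patty_count(N: int) -> int:
--     # closed form: a level-N burger recurrence 2m+1 from 1 gives 2^(N+1)-1
--     return (2 << max(N, 0)) - 1
-- ===== Notes on version B (the rewrite author's own statement) =====
-- stated objective: faster
-- what changed: Replaced the linear doubling loop with the closed form, one left shift; intended as faster (asymptotically fewer bignum operations; a timing run measured ~2500x at the largest size both programs finished).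
import Mathlib
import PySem

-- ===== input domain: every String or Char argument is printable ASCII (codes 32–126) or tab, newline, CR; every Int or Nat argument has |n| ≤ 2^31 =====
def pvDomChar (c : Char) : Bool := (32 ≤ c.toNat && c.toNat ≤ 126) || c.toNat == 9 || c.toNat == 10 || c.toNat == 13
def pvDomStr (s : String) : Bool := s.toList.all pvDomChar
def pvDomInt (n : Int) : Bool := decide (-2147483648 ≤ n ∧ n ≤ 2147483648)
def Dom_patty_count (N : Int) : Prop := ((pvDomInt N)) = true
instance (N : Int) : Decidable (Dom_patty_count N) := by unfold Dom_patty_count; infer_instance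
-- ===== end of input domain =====

-- B replaces the doubling loop by a closed-form shift (intended as faster; measured ~2500x at the largest size both finished).

-- ===== PORT A =====
def patty_count (N : Int) : Int :=
  if N = 0 then 1
  else (PySem.List.pyRange 0 N 1).foldl (fun memo _ => 2 * memo + 1) 1

-- ===== PORT B =====
def patty_count_alt (N : Int) : Int :=
  2 * 2 ^ (max N 0).toNat - 1   -- 2 << max(N,0) is 2 * 2^(max N 0); exact since the shift amount is a nonnegative int

-- ===== PRECONDITION & SPEC =====
def Spec_patty_count (N : Int) (out : Int) : Prop := out = patty_count_alt N
instance (N : Int) (out : Int) : Decidable (Spec_patty_count N out) := by unfold Spec_patty_count; infer_instance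

-- ===== CLAIM (what is proved, stated in full; the proofs are below) =====
def Claim_equal_patty_count : Prop := ∀ (N : Int), Dom_patty_count N → Spec_patty_count N (patty_count N)

-- ===== LEMMAS AND PROOFS =====
theorem patty_loop_closed {α : Type} (l : List α) (s : Int) :
    l.foldl (fun memo _ => 2 * memo + 1) s = 2 ^ l.length * (s + 1) - 1 := by
  induction l generalizing s with
  | nil => simp
  | cons a t ih =>
    simp only [List.foldl_cons, ih, List.length_cons]
    ring

-- ===== VERDICT (by name: the statement is the Claim_ definition above) =====
theorem patty_count_spec : Claim_equal_patty_count := by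
  intro N _
  unfold Spec_patty_count patty_count patty_count_alt
  split_ifs with h
  · subst h; decide
  · rw [patty_loop_closed, PySem.List.length_pyRange_one]
    by_cases hN : N ≤ 0
    · have h1 : (N - 0).toNat = 0 := by omega
      have h2 : (max N 0).toNat = 0 := by omega
      rw [h1, h2]; ring
    · have h2 : (max N 0) = N := by omega
      rw [h2, show N - 0 = N by ring]; ring
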